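-- pv_equiv track=rewrite | github.com/chancepants/aoc | 2024/day14.py | display_bots
-- ===== SOURCE A (Python) =====
-- def display_bots(robots: list[list[tuple[int,int]]], g: list[list[str]]) -> list[str]:
--     positions = set()
--     lines = []
--     for pos,_ in robots:
--         positions.add(pos)
--     for r in range(len(g)):
--         for c in range(len(g[r])):
--             g[r][c] = "*" if (c,r) in positions else "."
--         lines.append("".join(g[r]) + "\n")
--     return lines
-- ===== SOURCE B (Python) =====
-- def display_bots(robots: list[list[tuple[int,int]]], g: list[list[str]]) -> list[str]:
--     for row in g:
--         row[:] = ["."] * len(row)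
--     for pos, _ in robots:
--         c, r = pos
--         if 0 <= r < len(g) and 0 <= c < len(g[r]):
--             g[r][c] = "*"
--     return ["".join(row) + "\n" for row in g]
-- ===== Notes on version B (the rewrite author's own statement) =====
-- stated objective: alternative
-- what changed: A builds a set of robot positions and tests every grid cell against it; B instead blank-fills the grid with '.' row-wise and then scatters a '*' for each in-bounds robot position, finally joining the rows.
import Mathlib
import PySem

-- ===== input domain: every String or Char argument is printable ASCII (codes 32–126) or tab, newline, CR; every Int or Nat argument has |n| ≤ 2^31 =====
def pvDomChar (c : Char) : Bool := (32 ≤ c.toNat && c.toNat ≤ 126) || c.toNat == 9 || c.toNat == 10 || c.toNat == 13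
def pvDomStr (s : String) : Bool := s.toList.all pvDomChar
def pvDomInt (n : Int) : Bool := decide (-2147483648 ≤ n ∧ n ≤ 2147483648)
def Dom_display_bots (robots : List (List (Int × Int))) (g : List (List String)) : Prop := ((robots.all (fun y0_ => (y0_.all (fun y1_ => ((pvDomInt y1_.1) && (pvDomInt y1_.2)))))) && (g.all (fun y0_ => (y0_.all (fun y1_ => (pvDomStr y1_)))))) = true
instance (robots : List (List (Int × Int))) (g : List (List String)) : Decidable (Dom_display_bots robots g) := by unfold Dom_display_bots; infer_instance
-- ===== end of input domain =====

-- B replaces A's per-cell membership test against a position set by a blank-fill of the grid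
-- followed by a sparse scatter of '*' marks (alternative decomposition, same cost).
-- Both programs mutate g identically (every cell overwritten); the theorems are about the return value.

-- ===== PORT A =====
-- 'for pos,_ in robots: positions.add(pos)' (under Pre_ every robot list has length 2)
def pvAddPos (s : PySem.Set (Int × Int)) (rb : List (Int × Int)) : PySem.Set (Int × Int) :=
  match rb with
  | [p, _] => PySem.Set.add s p
  | _ => s

def display_bots (robots : List (List (Int × Int))) (g : List (List String)) : List String :=
  let positions : PySem.Set (Int × Int) := robots.foldl pvAddPos PySem.Set.empty
  (PySem.List.pyRange 0 (g.length : Int) 1).foldl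
    (fun lines r =>
      lines ++ [PySem.Str.join ""
        ((PySem.List.pyRange 0 ((PySem.List.pyGetD g r []).length : Int) 1).map
          (fun c => if (c, r) ∈ positions then "*" else ".")) ++ "\n"]) []

-- ===== PORT B =====
-- 'c, r = pos; if 0 <= r < len(g) and 0 <= c < len(g[r]): g[r][c] = "*"'
def pvScatter (gg : List (List String)) (rb : List (Int × Int)) : List (List String) :=
  match rb with
  | [(c, r), _] =>
    if 0 ≤ r ∧ r < (gg.length : Int) ∧ 0 ≤ c ∧ c < ((PySem.List.pyGetD gg r []).length : Int) then
      PySem.List.pySetD gg r (PySem.List.pySetD (PySem.List.pyGetD gg r []) c "*")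
    else gg
  | _ => gg

def display_bots_alt (robots : List (List (Int × Int))) (g : List (List String)) : List String :=
  let blank := g.map (fun row => row.map (fun _ => "."))
  let marked := robots.foldl pvScatter blank
  marked.map (fun row => PySem.Str.join "" row ++ "\n")

-- ===== PRECONDITION & SPEC =====
-- Pre_ excludes exactly the inputs where the unpack 'for pos,_ in robots' raises (a robot entry
-- whose length is not 2): both Pythons raise ValueError there.
def Pre_display_bots (robots : List (List (Int × Int))) (g : List (List String)) : Prop :=
  ∀ rb ∈ robots, rb.length = 2
instance (robots : List (List (Int × Int))) (g : List (List String)) : Decidable (Pre_display_bots robots g) := by unfold Pre_display_bots; infer_instance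

def pvWitness_display_bots : (List (List (Int × Int))) × List (List String) :=
  ([[((0 : Int), (0 : Int)), (1, 1)]], [["x", "y"], ["z", "w"]])

def Spec_display_bots (robots : List (List (Int × Int))) (g : List (List String)) (out : List String) : Prop := out = display_bots_alt robots g
instance (robots : List (List (Int × Int))) (g : List (List String)) (out : List String) : Decidable (Spec_display_bots robots g out) := by unfold Spec_display_bots; infer_instance

-- ===== CLAIM (what is proved, stated in full; the proofs are below) =====
def Claim_equal_display_bots : Prop := ∀ (robots : List (List (Int × Int))) (g : List (List String)), Dom_display_bots robots g → Pre_display_bots robots g → Spec_display_bots robots g (display_bots robots g)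

-- ===== LEMMAS AND PROOFS =====

def pvPosOf (rb : List (Int × Int)) : Option (Int × Int) :=
  match rb with
  | [p, _] => some p
  | _ => none

theorem pv_mem_foldl_addPos (rbs : List (List (Int × Int))) (s : PySem.Set (Int × Int)) (p : Int × Int) :
    p ∈ rbs.foldl pvAddPos s ↔ p ∈ s ∨ some p ∈ rbs.map pvPosOf := by
  induction rbs generalizing s with
  | nil => simp
  | cons rb rest ih =>
    simp only [List.foldl_cons, List.map_cons, List.mem_cons, ih]
    match rb with
    | [] => simp [pvAddPos, pvPosOf]
    | [q] => simp [pvAddPos, pvPosOf]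
    | [q, v] => simp [pvAddPos, pvPosOf, PySem.Set.mem_add]; tauto
    | q :: v :: w :: t => simp [pvAddPos, pvPosOf]

theorem pv_getD_set {α : Type} (xs : List α) (n i : Nat) (v d : α) :
    (xs.set n v).getD i d = if i = n ∧ n < xs.length then v else xs.getD i d := by
  simp only [List.getD_eq_getElem?_getD, List.getElem?_set]
  split_ifs with h1 h2 h3 h4 <;> simp_all

theorem pv_scatter_length (gg : List (List String)) (rb : List (Int × Int)) :
    (pvScatter gg rb).length = gg.length := by
  unfold pvScatter
  split <;> first | rfl | (split <;> simp [PySem.List.length_pySetD])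

theorem pv_scatter_rowlen (gg : List (List String)) (rb : List (Int × Int)) (i : Nat) :
    ((pvScatter gg rb).getD i []).length = (gg.getD i []).length := by
  unfold pvScatter
  split
  · rename_i c r v heq
    split
    · rename_i hb
      obtain ⟨hr0, hrl, hc0, hcl⟩ := hb
      rw [PySem.List.pySetD_of_nonneg _ _ hr0, pv_getD_set]
      split
      · rename_i h
        rw [PySem.List.pySetD_of_nonneg _ _ hc0, List.length_set,
            PySem.List.pyGetD_of_nonneg _ _ hr0, h.1]
      · rfl
    · rfl
  · rfl

theorem pv_cell_step (gg : List (List String)) (rb : List (Int × Int)) (i j : Nat)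
    (hi : i < gg.length) (hj : j < (gg.getD i []).length) :
    ((pvScatter gg rb).getD i []).getD j "" =
      if pvPosOf rb = some ((j : Int), (i : Int)) then "*" else (gg.getD i []).getD j "" := by
  match rb with
  | [] => simp [pvScatter, pvPosOf]
  | [q] => simp [pvScatter, pvPosOf]
  | q :: v :: w :: t => simp [pvScatter, pvPosOf]
  | [(c, r), v] =>
    simp only [pvScatter, pvPosOf, Option.some.injEq, Prod.mk.injEq]
    by_cases hpos : c = (j : Int) ∧ r = (i : Int)
    · obtain ⟨hc, hr⟩ := hpos
      subst hc; subst hr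
      have h0r : (0 : Int) ≤ (i : Int) := by positivity
      have h0c : (0 : Int) ≤ (j : Int) := by positivity
      have hguard : 0 ≤ (i : Int) ∧ (i : Int) < (gg.length : Int) ∧ 0 ≤ (j : Int) ∧
          (j : Int) < ((PySem.List.pyGetD gg (i : Int) []).length : Int) := by
        refine ⟨h0r, by exact_mod_cast hi, h0c, ?_⟩
        rw [PySem.List.pyGetD_of_nonneg _ _ h0r, Int.toNat_natCast]
        exact_mod_cast hj
      rw [if_pos hguard, if_pos ⟨rfl, rfl⟩,
          PySem.List.pyGetD_of_nonneg _ _ h0r, Int.toNat_natCast,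
          PySem.List.pySetD_of_nonneg _ _ h0c, Int.toNat_natCast,
          PySem.List.pySetD_of_nonneg _ _ h0r, Int.toNat_natCast,
          pv_getD_set, if_pos ⟨rfl, hi⟩, pv_getD_set, if_pos ⟨rfl, hj⟩]
    · rw [if_neg (show ¬(c = (j : Int) ∧ r = (i : Int)) from hpos)]
      split
      · rename_i hb
        obtain ⟨hr0, hrl, hc0, hcl⟩ := hb
        rw [PySem.List.pySetD_of_nonneg _ _ hr0, pv_getD_set]
        split
        · rename_i hset
          have hri : r = (i : Int) := by omega
          have hcj : c ≠ (j : Int) := fun hcj => hpos ⟨hcj, hri⟩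
          rw [PySem.List.pySetD_of_nonneg _ _ hc0, PySem.List.pyGetD_of_nonneg _ _ hr0,
              hset.1, pv_getD_set, if_neg (by omega)]
        · rfl
      · rfl

theorem pv_foldl_scatter_length (rbs : List (List (Int × Int))) (gg : List (List String)) :
    (rbs.foldl pvScatter gg).length = gg.length := by
  induction rbs generalizing gg with
  | nil => rfl
  | cons rb rest ih => rw [List.foldl_cons, ih, pv_scatter_length]

theorem pv_foldl_scatter_rowlen (rbs : List (List (Int × Int))) (gg : List (List String)) (i : Nat) :
    ((rbs.foldl pvScatter gg).getD i []).length = (gg.getD i []).length := by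
  induction rbs generalizing gg with
  | nil => rfl
  | cons rb rest ih => rw [List.foldl_cons, ih, pv_scatter_rowlen]

theorem pv_cell_foldl (rbs : List (List (Int × Int))) (gg : List (List String)) (i j : Nat)
    (hi : i < gg.length) (hj : j < (gg.getD i []).length) :
    ((rbs.foldl pvScatter gg).getD i []).getD j "" =
      if some ((j : Int), (i : Int)) ∈ rbs.map pvPosOf then "*" else (gg.getD i []).getD j "" := by
  induction rbs generalizing gg with
  | nil => simp
  | cons rb rest ih =>
    rw [List.foldl_cons,
        ih _ (by rwa [pv_scatter_length]) (by rwa [pv_scatter_rowlen]),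
        pv_cell_step gg rb i j hi hj]
    simp only [List.map_cons, List.mem_cons]
    by_cases h1 : some ((j : Int), (i : Int)) ∈ rest.map pvPosOf <;>
      by_cases h2 : pvPosOf rb = some ((j : Int), (i : Int)) <;>
        simp [h1, h2, eq_comm]

theorem pv_blank_row (g : List (List String)) (n : Nat) :
    (g.map (fun row => row.map (fun _ => ("." : String)))).getD n [] =
      (g.getD n []).map (fun _ => ".") := by
  simp only [List.getD_eq_getElem?_getD, List.getElem?_map]
  cases g[n]? <;> simp

-- ===== VERDICT (by name: the statement is the Claim_ definition above) =====
theorem display_bots_spec : Claim_equal_display_bots := by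
  intro robots g _ _
  unfold Spec_display_bots display_bots display_bots_alt
  dsimp only
  rw [PySem.List.foldl_append_singleton_eq_map, List.nil_append]
  apply List.ext_getElem
  · simp [PySem.List.length_pyRange_one, pv_foldl_scatter_length]
  · intro n h1 h2
    have hn : n < g.length := by
      simpa [pv_foldl_scatter_length] using h2
    have hnm : n < (robots.foldl pvScatter (g.map fun row => row.map fun _ => ".")).length := by
      simpa using h2
    rw [List.getElem_map, List.getElem_map, PySem.List.getElem_pyRange_one, zero_add]
    congr 1
    rw [List.getElem_eq_getD (h := hnm) ([] : List String)]
    congr 1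
    have h0n : (0 : Int) ≤ (n : Int) := by positivity
    apply List.ext_getElem
    · rw [List.length_map, PySem.List.length_pyRange_one, pv_foldl_scatter_rowlen,
          pv_blank_row, List.length_map, PySem.List.pyGetD_of_nonneg g _ h0n, Int.toNat_natCast]
      omega
    · intro j hj1 hj2
      have hrow : j < ((g.map fun row => row.map fun _ => ("." : String)).getD n []).length := by
        rwa [pv_foldl_scatter_rowlen] at hj2
      rw [List.getElem_map, PySem.List.getElem_pyRange_one, zero_add,
          List.getElem_eq_getD (h := hj2) ("" : String),
          pv_cell_foldl robots _ n j (by simpa using hn) hrow]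
      have hblank : ((g.map fun row => row.map fun _ => ("." : String)).getD n []).getD j "" = "." := by
        rw [pv_blank_row] at hrow ⊢
        rw [List.getD_eq_getElem _ _ hrow, List.getElem_map]
      rw [hblank]
      have hiff : ((j:Int), (n:Int)) ∈ robots.foldl pvAddPos PySem.Set.empty ↔
          some ((j:Int), (n:Int)) ∈ robots.map pvPosOf := by
        rw [pv_mem_foldl_addPos]; simp [PySem.Set.empty]
      simp only [hiff]
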